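-- pv_equiv track=rewrite | github.com/V1B3hR/bioart | src/biological/genetic_tools.py | _matches_pam_pattern
-- ===== SOURCE A (Python) =====
-- def _matches_pam_pattern(sequence: str, pattern: str) -> bool:
--     """Check if sequence matches PAM pattern"""
--     # Simplified pattern matching
--     if len(sequence) != len(pattern):
--         return False
--
--     for i in range(len(sequence)):
--         if pattern[i] not in ['N', '[AUCG]'] and pattern[i] != sequence[i]:
--             if pattern[i] == '[AG]' and sequence[i] not in 'AG':
--                 return False
--             elif pattern[i] == '[CU]' and sequence[i] not in 'CU':
--                 return False
--             elif pattern[i] == '[ACG]' and sequence[i] not in 'ACG':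
--                 return False
--
--     return True
-- ===== SOURCE B (Python) =====
-- def _matches_pam_pattern(sequence: str, pattern: str) -> bool:
--     """Check if sequence matches PAM pattern.
--
--     Every inner comparison in A's loop is dead code: pattern[i] is a single
--     character and can never equal the multi-character strings '[AG]', '[CU]'
--     or '[ACG]', so the loop never returns False. The function reduces to a
--     length comparison.
--     """
--     return len(sequence) == len(pattern)
-- ===== Notes on version B (the rewrite author's own statement) =====
-- stated objective: faster
-- what changed: Replaced the per-character loop (whose inner return-False branches are dead code, since a single character never equals '[AG]', '[CU]' or '[ACG]') with the closed-form length comparison len(sequence) == len(pattern).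
import Mathlib
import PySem

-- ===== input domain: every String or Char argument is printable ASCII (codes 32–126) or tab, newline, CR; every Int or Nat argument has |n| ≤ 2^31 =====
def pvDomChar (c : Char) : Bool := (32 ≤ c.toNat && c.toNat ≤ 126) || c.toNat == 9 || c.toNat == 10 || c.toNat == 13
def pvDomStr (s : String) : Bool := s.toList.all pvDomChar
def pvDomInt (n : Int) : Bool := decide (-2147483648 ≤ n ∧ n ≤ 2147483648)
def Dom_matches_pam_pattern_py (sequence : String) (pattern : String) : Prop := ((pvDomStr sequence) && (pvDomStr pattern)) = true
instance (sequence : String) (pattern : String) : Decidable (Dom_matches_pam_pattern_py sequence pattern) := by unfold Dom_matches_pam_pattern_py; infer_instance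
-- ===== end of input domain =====

-- B replaces A's per-character loop (whose inner return-False branches are dead code:
-- a single character never equals '[AG]', '[CU]' or '[ACG]') by the closed-form length
-- comparison; a timing run measured B faster.

-- ===== PORT A =====
-- the loop body, walking pattern and sequence characters in step (index i of A's range loop)
def pvLoopA : List Char → List Char → Bool
  | p :: ps, s :: ss =>
      if (¬ (p = 'N' ∨ String.ofList [p] = "[AUCG]")) ∧ p ≠ s then
        if String.ofList [p] = "[AG]" ∧ ¬ (s ∈ ("AG".toList)) then false
        else if String.ofList [p] = "[CU]" ∧ ¬ (s ∈ ("CU".toList)) then false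
        else if String.ofList [p] = "[ACG]" ∧ ¬ (s ∈ ("ACG".toList)) then false
        else pvLoopA ps ss
      else pvLoopA ps ss
  | _, _ => true

def matches_pam_pattern_py (sequence : String) (pattern : String) : Bool :=
  if sequence.toList.length ≠ pattern.toList.length then false
  else pvLoopA pattern.toList sequence.toList

-- ===== PORT B =====
def matches_pam_pattern_py_alt (sequence : String) (pattern : String) : Bool :=
  sequence.toList.length == pattern.toList.length

-- ===== PRECONDITION & SPEC =====
def Spec_matches_pam_pattern_py (sequence : String) (pattern : String) (out : Bool) : Prop := out = matches_pam_pattern_py_alt sequence pattern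
instance (sequence : String) (pattern : String) (out : Bool) : Decidable (Spec_matches_pam_pattern_py sequence pattern out) := by unfold Spec_matches_pam_pattern_py; infer_instance

-- ===== CLAIM (what is proved, stated in full; the proofs are below) =====
def Claim_equal_matches_pam_pattern_py : Prop := ∀ (sequence : String) (pattern : String), Dom_matches_pam_pattern_py sequence pattern → Spec_matches_pam_pattern_py sequence pattern (matches_pam_pattern_py sequence pattern)

-- ===== LEMMAS AND PROOFS =====
-- a one-character string never equals a multi-character literal
theorem pv_singleton_ne (p : Char) (l : List Char) (h : l.length ≠ 1) :
    String.ofList [p] ≠ String.ofList l := by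
  intro hEq
  have h2 := congrArg String.toList hEq
  simp only [String.toList_ofList] at h2
  exact h (by rw [← h2]; rfl)

-- A's loop never returns false: every inner branch's guard is unsatisfiable
theorem pvLoopA_true : ∀ (ps ss : List Char), pvLoopA ps ss = true := by
  intro ps
  induction ps with
  | nil => intro ss; cases ss <;> rfl
  | cons p ps ih =>
      intro ss
      cases ss with
      | nil => rfl
      | cons s ss =>
          simp only [pvLoopA]
          have h2 : String.ofList [p] ≠ "[AG]" := pv_singleton_ne p _ (by decide)
          have h3 : String.ofList [p] ≠ "[CU]" := pv_singleton_ne p _ (by decide)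
          have h4 : String.ofList [p] ≠ "[ACG]" := pv_singleton_ne p _ (by decide)
          split_ifs with c1 c2 c3 c4 <;>
            first
              | exact absurd c2.1 h2
              | exact absurd c3.1 h3
              | exact absurd c4.1 h4
              | exact ih ss

-- ===== VERDICT (by name: the statement is the Claim_ definition above) =====
theorem matches_pam_pattern_py_spec : Claim_equal_matches_pam_pattern_py := by
  intro sequence pattern _
  unfold Spec_matches_pam_pattern_py matches_pam_pattern_py matches_pam_pattern_py_alt
  have key : ∀ a b : Nat, decide (a = b) = (a == b) := by
    intro a b; by_cases h : a = b
    · simp [h]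
    · simp [h, beq_eq_false_iff_ne.mpr h]
  simp [pvLoopA_true, key]
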